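-- pv_equiv track=rewrite | github.com/GingerGigiCat/launchsnake | launchpad-snake.py | is_list_close
-- ===== SOURCE A (Python) =====
-- def is_list_close(input_list, max_difference=1):
--     big_num = input_list[0]
--     small_num = input_list[0]
--     for item in input_list:
--         if item > big_num:
--             big_num = item
--         elif item < small_num:
--             small_num = item
--         if big_num - small_num > max_difference:
--             return False
--     if big_num - small_num <= max_difference:
--         return True
-- ===== SOURCE B (Python) =====
-- def is_list_close(input_list, max_difference=1):
--     ordered = sorted(input_list)
--     return ordered[-1] - ordered[0] <= max_difference
-- ===== Notes on version B (the rewrite author's own statement) =====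
-- stated objective: alternative
-- what changed: Replaced the single-pass running-min/max loop with early exit by sorting the list once and comparing its two endpoints (last minus first element).
import Mathlib
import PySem

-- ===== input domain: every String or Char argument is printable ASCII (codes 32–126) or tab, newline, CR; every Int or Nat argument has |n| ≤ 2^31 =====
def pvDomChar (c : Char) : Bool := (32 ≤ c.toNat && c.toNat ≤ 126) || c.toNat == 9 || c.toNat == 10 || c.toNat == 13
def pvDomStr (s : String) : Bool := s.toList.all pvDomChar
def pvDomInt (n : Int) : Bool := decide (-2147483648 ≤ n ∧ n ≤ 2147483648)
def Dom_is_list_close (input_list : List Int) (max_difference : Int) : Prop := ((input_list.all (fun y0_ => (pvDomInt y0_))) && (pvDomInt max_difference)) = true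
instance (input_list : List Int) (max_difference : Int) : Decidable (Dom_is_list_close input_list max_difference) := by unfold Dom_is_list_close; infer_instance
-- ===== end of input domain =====

-- B sorts the list once and compares its two endpoints instead of tracking running
-- min/max in a single loop with early exit; objective: alternative (different algorithm).

-- ===== PORT A =====
-- the for-loop of A: state (big_num, small_num), early `return False`, then the final check
def isListCloseLoop (max_difference : Int) : Int → Int → List Int → Bool
  | big, small, [] => if big - small ≤ max_difference then true else false
  | big, small, item :: rest =>
      let big' := if item > big then item else big
      let small' := if item > big then small else if item < small then item else small
      if big' - small' > max_difference then false
      else isListCloseLoop max_difference big' small' rest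

def is_list_close (input_list : List Int) (max_difference : Int) : Bool :=
  match input_list with
  | [] => false  -- input_list[0] raises IndexError here; excluded by Pre_
  | x :: _ => isListCloseLoop max_difference x x input_list

-- ===== PORT B =====
-- ordered = sorted(input_list); return ordered[-1] - ordered[0] <= max_difference
def is_list_close_alt (input_list : List Int) (max_difference : Int) : Bool :=
  let ordered := PySem.List.sorted input_list (fun y => y)
  match PySem.List.pyGet? ordered (-1), PySem.List.pyGet? ordered 0 with
  | some last, some first => decide (last - first ≤ max_difference)
  | _, _ => false  -- empty list: both A and B raise IndexError; excluded by Pre_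

-- ===== PRECONDITION & SPEC =====
-- Both A and B raise IndexError on the empty list; Pre_ excludes exactly that input.
def Pre_is_list_close (input_list : List Int) (max_difference : Int) : Prop := input_list ≠ []
instance (input_list : List Int) (max_difference : Int) : Decidable (Pre_is_list_close input_list max_difference) := by unfold Pre_is_list_close; infer_instance
def pvWitness_is_list_close : List Int × Int := ([3, 4, 3], 1)

def Spec_is_list_close (input_list : List Int) (max_difference : Int) (out : Bool) : Prop := out = is_list_close_alt input_list max_difference
instance (input_list : List Int) (max_difference : Int) (out : Bool) : Decidable (Spec_is_list_close input_list max_difference out) := by unfold Spec_is_list_close; infer_instance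

-- ===== CLAIM =====
def Claim_equal_is_list_close : Prop := ∀ (input_list : List Int) (max_difference : Int), Dom_is_list_close input_list max_difference → Pre_is_list_close input_list max_difference → Spec_is_list_close input_list max_difference (is_list_close input_list max_difference)

-- ===== LEMMAS AND PROOFS =====
-- A's loop computes exactly "final max - final min ≤ d"; the early-exit branch is sound
-- because the running difference only grows.
theorem isListCloseLoop_eq (d : Int) (xs : List Int) :
    ∀ big small : Int, small ≤ big →
      isListCloseLoop d big small xs
        = decide (xs.foldl max big - xs.foldl min small ≤ d) := by
  induction xs with
  | nil => intro big small _; simp [isListCloseLoop]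
  | cons x t ih =>
      intro big small hsb
      have hb' : (if x > big then x else big) = max big x := by
        simp [max_def]; split_ifs <;> omega
      have hs' : (if x > big then small else if x < small then x else small) = min small x := by
        simp [min_def]; split_ifs <;> omega
      simp only [isListCloseLoop, hb', hs', List.foldl_cons]
      split_ifs with h
      · have h1 := (PySem.List.le_foldl_max t (max big x)).1
        have h2 := (PySem.List.foldl_min_le t (min small x)).1
        symm; simp only [decide_eq_false_iff_not]; omega
      · exact ih (max big x) (min small x) (by omega)

-- foldl max / foldl min starting from a list element stay inside the list
theorem foldl_max_mem (l : List Int) : ∀ init : Int, l.foldl max init = init ∨ l.foldl max init ∈ l := by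
  induction l with
  | nil => intro init; left; rfl
  | cons a t ih =>
      intro init
      rcases ih (max init a) with h | h
      · rcases max_choice init a with hm | hm
        · left; simpa [hm] using h
        · right; simp [List.foldl_cons] at h ⊢; left; omega
      · right; simp [List.foldl_cons]; right; exact h

theorem foldl_min_mem (l : List Int) : ∀ init : Int, l.foldl min init = init ∨ l.foldl min init ∈ l := by
  induction l with
  | nil => intro init; left; rfl
  | cons a t ih =>
      intro init
      rcases ih (min init a) with h | h
      · rcases min_choice init a with hm | hm
        · left; simpa [hm] using h
        · right; simp [List.foldl_cons] at h ⊢; left; omega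
      · right; simp [List.foldl_cons]; right; exact h

-- every element of sorted(xs) is ≤ its last element
theorem sorted_le_getLast (xs : List Int) (h : PySem.List.sorted xs (fun y => y) ≠ []) :
    ∀ y ∈ PySem.List.sorted xs (fun y => y), y ≤ (PySem.List.sorted xs (fun y => y)).getLast h := by
  intro y hy
  rcases List.mem_iff_getElem.1 hy with ⟨i, hi, rfl⟩
  rw [List.getLast_eq_getElem]
  exact PySem.List.sorted_id_getElem_mono xs (by omega) (by omega)

-- ===== VERDICT =====
theorem is_list_close_spec : Claim_equal_is_list_close := by
  intro input_list d _ hpre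
  match input_list with
  | [] => exact absurd rfl hpre
  | x :: t =>
      show isListCloseLoop d x x (x :: t) = is_list_close_alt (x :: t) d
      rw [isListCloseLoop_eq d (x :: t) x x le_rfl]
      -- the sorted list is nonempty
      have hsne : PySem.List.sorted (x :: t) (fun y => y) ≠ [] := by
        simp [PySem.List.sorted_eq_nil_iff]
      obtain ⟨m, u, hmu⟩ := List.exists_cons_of_ne_nil hsne
      have hperm := PySem.List.sorted_perm (x :: t) (fun y => y) false
      -- head of sorted = min side
      have hmmem : m ∈ (x :: t) := hperm.mem_iff.1 (by simp [hmu])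
      have hmle : ∀ y ∈ (x :: t), m ≤ y := PySem.List.key_head_sorted_le (x :: t) (fun y => y) hmu
      -- last of sorted = max side
      set L := (PySem.List.sorted (x :: t) (fun y => y)).getLast hsne with hL
      have hLmem : L ∈ (x :: t) := hperm.mem_iff.1 (List.getLast_mem hsne)
      have hLge : ∀ y ∈ (x :: t), y ≤ L := by
        intro y hy
        exact sorted_le_getLast (x :: t) hsne y (hperm.mem_iff.2 hy)
      -- foldl max = L
      have hmaxfacts := PySem.List.le_foldl_max (x :: t) x
      have hFmem : (x :: t).foldl max x ∈ (x :: t) := by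
        rcases foldl_max_mem (x :: t) x with h | h
        · rw [h]; simp
        · exact h
      have hF : (x :: t).foldl max x = L :=
        le_antisymm (hLge _ hFmem) (hmaxfacts.2 L hLmem)
      -- foldl min = m
      have hminfacts := PySem.List.foldl_min_le (x :: t) x
      have hGmem : (x :: t).foldl min x ∈ (x :: t) := by
        rcases foldl_min_mem (x :: t) x with h | h
        · rw [h]; simp
        · exact h
      have hG : (x :: t).foldl min x = m :=
        le_antisymm (hminfacts.2 m hmmem) (hmle _ hGmem)
      -- B's side: index the sorted list at -1 and 0
      have hget0 : PySem.List.pyGet? (PySem.List.sorted (x :: t) (fun y => y)) 0 = some m := by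
        rw [PySem.List.pyGet?_zero, hmu]; rfl
      have hgetL : PySem.List.pyGet? (PySem.List.sorted (x :: t) (fun y => y)) (-1) = some L := by
        rw [PySem.List.pyGet?_neg_one, hL, List.getLast?_eq_some_getLast hsne]
      simp only [is_list_close_alt, hget0, hgetL, hF, hG]
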